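-- pv_equiv track=rewrite | github.com/SeonggonKim/Programmers | 프로그래머스/lv0/120835. 진료 순서 정하기/진료 순서 정하기.py | solution
-- ===== SOURCE A (Python) =====
-- def solution(emergency):
--     answer = []
--     my_list = sorted(emergency, reverse=True)
--     my_dict = {}
--     for i in range(len(my_list)):
--         my_dict[my_list[i]] = i+1
--
--     for j in emergency:
--         answer.append(my_dict[j])
--
--     return answer
-- ===== SOURCE B (Python) =====
-- def solution(emergency):
--     return [sum(1 for x in emergency if x >= e) for e in emergency]
-- ===== Notes on version B (the rewrite author's own statement) =====
-- stated objective: simpler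
-- what changed: Replaces the sort + index dict (rank table) with a direct per-element counting comprehension: each rank is the number of elements >= the element.
import Mathlib
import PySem

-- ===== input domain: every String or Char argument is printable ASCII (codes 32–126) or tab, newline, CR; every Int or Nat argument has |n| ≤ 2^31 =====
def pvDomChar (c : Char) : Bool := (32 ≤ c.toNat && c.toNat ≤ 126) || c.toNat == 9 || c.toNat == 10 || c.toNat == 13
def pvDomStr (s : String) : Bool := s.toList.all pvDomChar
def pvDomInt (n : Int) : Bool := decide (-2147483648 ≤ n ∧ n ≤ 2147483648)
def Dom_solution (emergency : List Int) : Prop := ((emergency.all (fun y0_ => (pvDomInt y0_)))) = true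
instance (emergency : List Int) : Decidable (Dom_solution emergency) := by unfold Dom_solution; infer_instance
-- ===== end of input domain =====

-- B replaces A's sort + rank dict with a direct per-element count of elements ≥ it (simpler, no speed claim).

-- ===== PORT A =====
-- my_dict[j] is ported as (get? j).getD 0; the key is always present (j ∈ sorted emergency), so the
-- default is never used and Python raises no KeyError: A is total.
def solution (emergency : List Int) : List Int :=
  let myList := PySem.List.sorted emergency (fun x => x) true
  let myDict : PySem.Dict Int Int :=
    (PySem.List.pyRange 0 (myList.length : Int)).foldl
      (fun d i => d.insert (PySem.List.pyGetD myList i 0) (i + 1)) PySem.Dict.empty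
  emergency.foldl (fun answer j => answer ++ [(myDict.get? j).getD 0]) []

-- ===== PORT B =====
def solution_alt (emergency : List Int) : List Int :=
  emergency.map (fun e => (emergency.map (fun x => if x ≥ e then (1 : Int) else 0)).sum)

-- ===== PRECONDITION & SPEC =====
def Spec_solution (emergency : List Int) (out : List Int) : Prop := out = solution_alt emergency
instance (emergency : List Int) (out : List Int) : Decidable (Spec_solution emergency out) := by unfold Spec_solution; infer_instance

-- ===== CLAIM (what is proved, stated in full; the proofs are below) =====
def Claim_equal_solution : Prop := ∀ (emergency : List Int), Dom_solution emergency → Spec_solution emergency (solution emergency)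

-- ===== LEMMAS AND PROOFS =====

-- Abstract form of A's dict-building loop: insert the elements of L in order, with values k+1, k+2, …
def buildDict (d : PySem.Dict Int Int) (k : Int) : List Int → PySem.Dict Int Int
  | [] => d
  | x :: xs => buildDict (d.insert x (k + 1)) (k + 1) xs

-- A's fold over range(len(my_list)) indexing into pre ++ L at positions pre.length, … is buildDict.
theorem fold_eq_buildDict (L : List Int) : ∀ (pre : List Int) (d : PySem.Dict Int Int),
    (PySem.List.pyRange (pre.length : Int) ((pre.length + L.length : Nat) : Int)).foldl
      (fun d i => d.insert (PySem.List.pyGetD (pre ++ L) i 0) (i + 1)) d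
    = buildDict d (pre.length : Int) L := by
  induction L with
  | nil => intro pre d; simp [buildDict, PySem.List.pyRange_one_eq_nil]
  | cons x xs ih =>
    intro pre d
    have hlt : (pre.length : Int) < ((pre.length + (x :: xs).length : Nat) : Int) := by
      simp only [List.length_cons]; push_cast; omega
    rw [PySem.List.pyRange_one_cons hlt]
    simp only [List.foldl_cons]
    rw [PySem.List.pyGetD_natCast]
    have hget : (pre ++ x :: xs).getD pre.length 0 = x := by
      simp [List.getD]
    rw [hget]
    conv_rhs => rw [buildDict]
    have h2 := ih (pre ++ [x]) (d.insert x ((pre.length : Int) + 1))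
    simp only [List.append_assoc, List.singleton_append, List.length_append,
      List.length_nil, List.length_cons] at h2 ⊢
    push_cast at h2 ⊢
    ring_nf at h2 ⊢
    exact h2

theorem buildDict_get_not_mem (L : List Int) : ∀ (d : PySem.Dict Int Int) (k : Int) (v : Int),
    v ∉ L → (buildDict d k L).get? v = d.get? v := by
  induction L with
  | nil => intro d k v _; simp [buildDict]
  | cons x xs ih =>
    intro d k v hv
    simp only [List.mem_cons, not_or] at hv
    rw [buildDict, ih _ _ _ hv.2, PySem.Dict.get?_insert_of_ne _ _ hv.1]

-- On a non-increasing list L, the final value at key v ∈ L is k + (number of elements ≥ v).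
theorem buildDict_get_mem (L : List Int) : ∀ (d : PySem.Dict Int Int) (k : Int) (v : Int),
    L.Pairwise (fun a b => b ≤ a) → v ∈ L →
    (buildDict d k L).get? v = some (k + (L.countP (fun x => v ≤ x) : Int)) := by
  induction L with
  | nil => intro _ _ _ _ hv; cases hv
  | cons x xs ih =>
    intro d k v hsort hv
    have hx : ∀ y ∈ xs, y ≤ x := (List.pairwise_cons.mp hsort).1
    rw [buildDict]
    by_cases hmem : v ∈ xs
    · have hvx : v ≤ x := hx v hmem
      rw [ih _ _ _ hsort.of_cons hmem]
      have : (x :: xs).countP (fun x_1 => decide (v ≤ x_1)) = xs.countP (fun x_1 => decide (v ≤ x_1)) + 1 := by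
        rw [List.countP_cons]; simp [hvx]
      rw [this]; push_cast; ring_nf
    · have hvx : v = x := by rcases List.mem_cons.mp hv with h | h; exact h; exact absurd h hmem
      subst hvx
      rw [buildDict_get_not_mem _ _ _ _ hmem, PySem.Dict.get?_insert_self]
      have hcnt : (v :: xs).countP (fun y => decide (v ≤ y)) = 1 := by
        rw [List.countP_cons]
        simp only [le_refl, decide_true, if_pos]
        have : xs.countP (fun y => decide (v ≤ y)) = 0 := by
          rw [List.countP_eq_zero]
          intro y hy
          have h1 : y ≤ v := hx y hy
          have h2 : y ≠ v := fun h => hmem (h ▸ hy)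
          simp; omega
        omega
      rw [hcnt]; norm_num

theorem solution_eq_alt (emergency : List Int) :
    solution emergency = solution_alt emergency := by
  unfold solution solution_alt
  rw [PySem.List.foldl_append_singleton_eq_map, List.nil_append]
  apply List.map_congr_left
  intro j hj
  set L := PySem.List.sorted emergency (fun x => x) true with hL
  have hfold := fold_eq_buildDict L [] PySem.Dict.empty
  simp only [List.length_nil, Nat.cast_zero, List.nil_append, Nat.zero_add] at hfold
  rw [hfold]
  have hmem : j ∈ L := by
    rw [hL]
    exact ((PySem.List.sorted_perm emergency (fun x => x) true).mem_iff).mpr hj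
  rw [buildDict_get_mem L PySem.Dict.empty 0 j
    (PySem.List.sorted_pairwise_rev emergency (fun x => x)) hmem]
  have hperm : L.countP (fun x => decide (j ≤ x)) = emergency.countP (fun x => decide (j ≤ x)) :=
    (PySem.List.sorted_perm emergency (fun x => x) true).countP_eq _
  have hsum : (emergency.map (fun x => if x ≥ j then (1 : Int) else 0)).sum
      = (emergency.countP (fun x => decide (j ≤ x)) : Int) := by
    rw [← PySem.List.sum_map_ite_one_zero (fun x => decide (j ≤ x)) emergency]
    apply congrArg
    apply List.map_congr_left
    intro x _
    simp [ge_iff_le]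
  simp [hperm, hsum]

-- ===== VERDICT (by name: the statement is the Claim_ definition above) =====
theorem solution_spec : Claim_equal_solution := by
  intro emergency _
  exact solution_eq_alt emergency
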